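-- pv_equiv track=rewrite | github.com/CRFICH404/VaM_Missing_Dependencies_Check | Dependencies_Finder.py | replace_last_part_in_name
-- ===== SOURCE A (Python) =====
-- def replace_last_part_in_name(dep_name, replace_with):
--     new_name = ''
--     dep_name = dep_name.split(".")
--     dep_name = dep_name[:-1]
--     for part in dep_name:
--         if new_name == '':
--             new_name = part
--         else:
--             new_name += '.' + part
--
--     return new_name + replace_with
-- ===== SOURCE B (Python) =====
-- def replace_last_part_in_name(dep_name, replace_with):
--     idx = dep_name.rfind('.')
--     if idx == -1:
--         return replace_with
--     return dep_name[:idx] + replace_with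
-- ===== Notes on version B (the rewrite author's own statement) =====
-- stated objective: simpler
-- what changed: B locates the last dot with a single rfind and slices the prefix before it, instead of splitting into a list, dropping the last piece and re-joining it in a manual accumulator loop.
-- intended difference: On names that start with '.' and contain at least two dots (e.g. '.a.b'), A's manual join skips the leading empty parts and so silently drops the leading dot run (A returns 'a'+replace_with), while B returns the full prefix before the last dot ('.a'+replace_with), which is the intended 'replace the last dot-segment' behaviour. — e.g. on replace_last_part_in_name(".a.b", "X"): A returns "aX", B returns ".aX"
import Mathlib
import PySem

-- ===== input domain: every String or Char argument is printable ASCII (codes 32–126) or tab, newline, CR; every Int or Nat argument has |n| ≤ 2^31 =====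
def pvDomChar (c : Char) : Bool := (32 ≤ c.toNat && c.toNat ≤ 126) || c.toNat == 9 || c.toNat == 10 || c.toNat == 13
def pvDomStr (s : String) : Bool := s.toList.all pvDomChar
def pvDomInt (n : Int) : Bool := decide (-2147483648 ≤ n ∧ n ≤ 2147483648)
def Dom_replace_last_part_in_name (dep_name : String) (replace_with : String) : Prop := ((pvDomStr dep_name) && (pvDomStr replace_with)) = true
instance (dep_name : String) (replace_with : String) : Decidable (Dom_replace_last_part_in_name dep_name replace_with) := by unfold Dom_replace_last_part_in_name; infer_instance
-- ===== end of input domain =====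

-- B replaces A's split/drop-last/manual-rejoin with a single rfind plus a prefix slice (simpler);
-- on names starting with '.' that contain ≥ 2 dots, A drops the leading dot run (an artefact of its
-- empty-accumulator join) while B keeps the full prefix before the last dot — stated as D_ below.


-- ===== PORT A =====
-- strings are handled as their code-point lists (PySem convention); exact on the domain
def replace_last_part_in_name (dep_name : String) (replace_with : String) : String :=
  let parts := PySem.Chars.splitOn dep_name.toList ['.']          -- dep_name = dep_name.split(".")
  let parts := PySem.List.slice parts none (some (-1))            -- dep_name = dep_name[:-1]
  let new_name := parts.foldl                                     -- for part in dep_name: ...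
    (fun new_name part => if new_name = ([] : List Char) then part else new_name ++ '.' :: part) []
  String.ofList (new_name ++ replace_with.toList)                 -- return new_name + replace_with

-- ===== PORT B =====
def replace_last_part_in_name_alt (dep_name : String) (replace_with : String) : String :=
  let idx := PySem.Chars.rfind dep_name.toList ['.']              -- idx = dep_name.rfind('.')
  if idx = -1 then replace_with                                   -- if idx == -1: return replace_with
  else String.ofList (PySem.Chars.slice dep_name.toList none (some idx) ++ replace_with.toList)
                                                                  -- return dep_name[:idx] + replace_with

-- ===== PRECONDITION & SPEC =====
-- On names that start with '.' and contain at least two dots, A's manual join skips the leading empty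
-- parts and so drops the leading dot run (A(".a.b","X") = "aX"), while B returns the full prefix before
-- the last dot (".aX"), the intended 'replace the last dot-segment' behaviour.
def D_replace_last_part_in_name (dep_name : String) (_replace_with : String) : Prop :=
  dep_name.toList.head? = some '.' ∧ 2 ≤ dep_name.toList.count '.'
instance (dep_name : String) (replace_with : String) : Decidable (D_replace_last_part_in_name dep_name replace_with) := by unfold D_replace_last_part_in_name; infer_instance

def Spec_replace_last_part_in_name (dep_name : String) (replace_with : String) (out : String) : Prop := ¬ D_replace_last_part_in_name dep_name replace_with → out = replace_last_part_in_name_alt dep_name replace_with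
instance (dep_name : String) (replace_with : String) (out : String) : Decidable (Spec_replace_last_part_in_name dep_name replace_with out) := by unfold Spec_replace_last_part_in_name; infer_instance

def pvDiffWitness_replace_last_part_in_name : String × String := (".a.b", "X")
def pvDiffWitnessOut_replace_last_part_in_name : String × String := ("aX", ".aX")

-- ===== CLAIM (what is proved, stated in full; the proofs are below) =====
def Claim_unchanged_replace_last_part_in_name : Prop := ∀ (dep_name : String) (replace_with : String), Dom_replace_last_part_in_name dep_name replace_with → Spec_replace_last_part_in_name dep_name replace_with (replace_last_part_in_name dep_name replace_with)
def Claim_changed_replace_last_part_in_name : Prop := Dom_replace_last_part_in_name (pvDiffWitness_replace_last_part_in_name.1) (pvDiffWitness_replace_last_part_in_name.2) ∧ D_replace_last_part_in_name (pvDiffWitness_replace_last_part_in_name.1) (pvDiffWitness_replace_last_part_in_name.2) ∧ replace_last_part_in_name (pvDiffWitness_replace_last_part_in_name.1) (pvDiffWitness_replace_last_part_in_name.2) = pvDiffWitnessOut_replace_last_part_in_name.1 ∧ replace_last_part_in_name_alt (pvDiffWitness_replace_last_part_in_name.1) (pvDiffWitness_replace_last_part_in_name.2) = pvDiffWitnessOut_replace_last_part_in_name.2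 ∧ pvDiffWitnessOut_replace_last_part_in_name.1 ≠ pvDiffWitnessOut_replace_last_part_in_name.2
def Claim_exact_replace_last_part_in_name : Prop := ∀ (dep_name : String) (replace_with : String), Dom_replace_last_part_in_name dep_name replace_with → D_replace_last_part_in_name dep_name replace_with → replace_last_part_in_name dep_name replace_with ≠ replace_last_part_in_name_alt dep_name replace_with

-- ===== LEMMAS AND PROOFS =====

-- simple front-recursive reference versions of split('.') and rfind('.')
def pvSplitDots : List Char → List (List Char)
  | [] => [[]]
  | c :: cs => if c = '.' then [] :: pvSplitDots cs else (pvSplitDots cs).modifyHead (c :: ·)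

def pvLastDot : List Char → Int
  | [] => -1
  | c :: cs => if pvLastDot cs = -1 then (if c = '.' then 0 else -1) else pvLastDot cs + 1

def pvLastUpTo (s : List Char) : Nat → Int
  | 0 => if s[0]? = some '.' then 0 else -1
  | j + 1 => if s[j + 1]? = some '.' then ((j : Int) + 1) else pvLastUpTo s j

theorem pv_isPrefixOf_dot (l : List Char) : (['.'].isPrefixOf l = true) ↔ l.head? = some '.' := by
  cases l with
  | nil => simp [List.isPrefixOf]
  | cons a as => simp [List.isPrefixOf]; exact eq_comm

-- ---- splitOn bridge ----
theorem pv_go_split (l : List Char) : ∀ (fuel : Nat) (cur : List Char) (acc : List (List Char)),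
    l.length ≤ fuel →
    PySem.Chars.splitOn.go ['.'] fuel l cur acc
      = acc.reverse ++ (pvSplitDots l).modifyHead (cur.reverse ++ ·) := by
  induction l with
  | nil =>
    intro fuel cur acc _
    cases fuel with
    | zero => simp [PySem.Chars.splitOn.go, pvSplitDots]
    | succ f => simp [PySem.Chars.splitOn.go, pvSplitDots]
  | cons a rest ih =>
    intro fuel cur acc hlen
    cases fuel with
    | zero => simp at hlen
    | succ f =>
      by_cases ha : a = '.'
      · subst ha
        have : PySem.Chars.splitOn.go ['.'] (f + 1) ('.' :: rest) cur acc
            = PySem.Chars.splitOn.go ['.'] f rest [] (cur.reverse :: acc) := by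
          simp [PySem.Chars.splitOn.go]
        rw [this, ih f [] (cur.reverse :: acc) (by simpa using hlen)]
        simp only [pvSplitDots, List.reverse_cons, List.reverse_nil, List.nil_append,
          List.append_assoc]
        show acc.reverse ++ cur.reverse :: List.modifyHead id (pvSplitDots rest) = _
        rw [List.modifyHead_id]
        simp
      · have hstep : PySem.Chars.splitOn.go ['.'] (f + 1) (a :: rest) cur acc
            = PySem.Chars.splitOn.go ['.'] f rest (a :: cur) acc := by
          simp [PySem.Chars.splitOn.go, List.isPrefixOf, Ne.symm ha]
        rw [hstep, ih f (a :: cur) acc (by simpa using hlen)]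
        cases hS : pvSplitDots rest with
        | nil => simp [pvSplitDots, ha, hS]
        | cons h t => simp [pvSplitDots, ha, hS, List.append_assoc]

theorem pv_splitOn_eq (cs : List Char) : PySem.Chars.splitOn cs ['.'] = pvSplitDots cs := by
  have h := pv_go_split cs (cs.length + 1) [] [] (by omega)
  show PySem.Chars.splitOn.go ['.'] (cs.length + 1) cs [] [] = pvSplitDots cs
  rw [h]
  simp only [List.reverse_nil, List.nil_append]
  show List.modifyHead id (pvSplitDots cs) = pvSplitDots cs
  rw [List.modifyHead_id]
  rfl

-- ---- rfind bridge ----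
theorem pv_go_rfind (s : List Char) : ∀ j : Nat, PySem.Chars.rfind.go s ['.'] j = pvLastUpTo s j := by
  intro j
  induction j with
  | zero =>
    by_cases h : s[0]? = some '.'
    · have : ['.'].isPrefixOf s = true := (pv_isPrefixOf_dot s).2 (by simpa [List.head?_eq_getElem?] using h)
      simp [PySem.Chars.rfind.go, pvLastUpTo, this, h]
    · have : ¬ (['.'].isPrefixOf s = true) := by
        intro hc; exact h (by simpa [List.head?_eq_getElem?] using (pv_isPrefixOf_dot s).1 hc)
      simp [PySem.Chars.rfind.go, pvLastUpTo, this, h]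
  | succ j ih =>
    by_cases h : s[j + 1]? = some '.'
    · have : ['.'].isPrefixOf (s.drop (j + 1)) = true :=
        (pv_isPrefixOf_dot _).2 (by simpa [List.head?_drop] using h)
      simp [PySem.Chars.rfind.go, pvLastUpTo, this, h]
    · have : ¬ (['.'].isPrefixOf (s.drop (j + 1)) = true) := by
        intro hc; exact h (by simpa [List.head?_drop] using (pv_isPrefixOf_dot _).1 hc)
      simp [PySem.Chars.rfind.go, pvLastUpTo, this, h, ih]

theorem pv_lastUpTo_cons (c : Char) (cs : List Char) : ∀ j : Nat,
    pvLastUpTo (c :: cs) (j + 1)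
      = if pvLastUpTo cs j = -1 then (if c = '.' then 0 else -1) else pvLastUpTo cs j + 1 := by
  intro j
  induction j with
  | zero =>
    by_cases h : cs[0]? = some '.'
    · simp [pvLastUpTo, h]
    · simp [pvLastUpTo, h]
  | succ j ih =>
    by_cases h : cs[j + 1]? = some '.'
    · have h' : (c :: cs)[j + 2]? = some '.' := by simpa using h
      simp [pvLastUpTo, h, h']
      omega
    · have h' : ¬ ((c :: cs)[j + 2]? = some '.') := by simpa using h
      simp only [pvLastUpTo, if_neg h, if_neg h']
      exact ih

theorem pv_rfind_eq (cs : List Char) : PySem.Chars.rfind cs ['.'] = pvLastDot cs := by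
  show PySem.Chars.rfind.go cs ['.'] cs.length = pvLastDot cs
  rw [pv_go_rfind]
  induction cs with
  | nil => simp [pvLastUpTo, pvLastDot]
  | cons c cs ih =>
    have : (c :: cs).length = cs.length + 1 := by simp
    rw [this, pv_lastUpTo_cons, ih, pvLastDot]

-- ---- facts about pvLastDot / pvSplitDots ----
theorem pv_lastDot_ge_neg_one (cs : List Char) : -1 ≤ pvLastDot cs := by
  induction cs with
  | nil => simp [pvLastDot]
  | cons c cs ih =>
    by_cases h : pvLastDot cs = -1
    · by_cases hc : c = '.' <;> simp [pvLastDot, h, hc]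
    · rw [pvLastDot, if_neg h]; omega

theorem pv_lastDot_neg_iff (cs : List Char) : pvLastDot cs = -1 ↔ '.' ∉ cs := by
  induction cs with
  | nil => simp [pvLastDot]
  | cons c cs ih =>
    by_cases h : pvLastDot cs = -1
    · by_cases hc : c = '.'
      · simp [pvLastDot, h, hc]
      · simp [pvLastDot, h, hc, ih.1 h, Ne.symm hc]
    · have hmem : '.' ∈ cs := by by_contra hm; exact h (ih.2 hm)
      constructor
      · intro he; rw [pvLastDot, if_neg h] at he
        have := pv_lastDot_ge_neg_one cs; omega
      · intro hn; exact absurd (List.mem_cons_of_mem c hmem) hn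

theorem pv_splitDots_ne_nil (cs : List Char) : pvSplitDots cs ≠ [] := by
  induction cs with
  | nil => simp [pvSplitDots]
  | cons c cs ih =>
    by_cases hc : c = '.'
    · simp [pvSplitDots, hc]
    · cases hS : pvSplitDots cs with
      | nil => exact absurd hS ih
      | cons h t => simp [pvSplitDots, hc, hS]

theorem pv_splitDots_no_dot (cs : List Char) (h : '.' ∉ cs) : pvSplitDots cs = [cs] := by
  induction cs with
  | nil => simp [pvSplitDots]
  | cons c cs ih =>
    have hc : c ≠ '.' := fun he => h (by simp [he])
    have hcs : '.' ∉ cs := fun hm => h (List.mem_cons_of_mem c hm)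
    simp [pvSplitDots, hc, ih hcs]

theorem pv_splitDots_dot (cs : List Char) (h : '.' ∈ cs) :
    ∃ hd tl, pvSplitDots cs = hd :: tl ∧ tl ≠ [] := by
  induction cs with
  | nil => simp at h
  | cons c cs ih =>
    by_cases hc : c = '.'
    · exact ⟨[], pvSplitDots cs, by simp [pvSplitDots, hc], pv_splitDots_ne_nil cs⟩
    · have hcs : '.' ∈ cs := by
        rcases List.mem_cons.1 h with h1 | h1
        · exact absurd h1.symm hc
        · exact h1
      obtain ⟨hd, tl, hS, ht⟩ := ih hcs
      exact ⟨c :: hd, tl, by simp [pvSplitDots, hc, hS], ht⟩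

theorem pv_splitDots_no_dot_parts (cs : List Char) : ∀ p ∈ pvSplitDots cs, '.' ∉ p := by
  induction cs with
  | nil => simp [pvSplitDots]
  | cons c cs ih =>
    by_cases hc : c = '.'
    · intro p hp
      rw [pvSplitDots, if_pos hc] at hp
      rcases List.mem_cons.1 hp with h1 | h1
      · simp [h1]
      · exact ih p h1
    · intro p hp
      cases hS : pvSplitDots cs with
      | nil => exact absurd hS (pv_splitDots_ne_nil cs)
      | cons hd tl =>
        rw [pvSplitDots, if_neg hc, hS] at hp
        rcases List.mem_cons.1 hp with h1 | h1
        · subst h1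
          intro hm
          rcases List.mem_cons.1 hm with h2 | h2
          · exact hc h2.symm
          · exact ih hd (by simp [hS]) h2
        · exact ih p (by simp [hS, h1])

-- ---- the A-side fold ----
theorem pv_fold_nonempty (l : List (List Char)) : ∀ acc : List Char, acc ≠ [] →
    l.foldl (fun nn part => if nn = ([] : List Char) then part else nn ++ '.' :: part) acc
      = acc ++ (l.map ('.' :: ·)).flatten := by
  induction l with
  | nil => intro acc _; simp
  | cons p rest ih =>
    intro acc hacc
    have h1 : (if acc = ([] : List Char) then p else acc ++ '.' :: p) = acc ++ '.' :: p := by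
      simp [hacc]
    simp only [List.foldl_cons, h1]
    rw [ih (acc ++ '.' :: p) (by simp)]
    simp [List.append_assoc]

theorem pv_fold_join (l : List (List Char)) (hl : ∀ p ∈ l, '.' ∉ p) :
    l.foldl (fun nn part => if nn = ([] : List Char) then part else nn ++ '.' :: part) []
      = ((l.map ('.' :: ·)).flatten).dropWhile (· == '.') := by
  induction l with
  | nil => simp
  | cons p rest ih =>
    cases p with
    | nil =>
      simp only [List.foldl_cons, if_true]
      rw [ih (fun q hq => hl q (List.mem_cons_of_mem _ hq))]
      simp
    | cons a p' =>
      have ha : a ≠ '.' := by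
        intro he; exact hl (a :: p') (by simp) (by simp [he])
      simp only [List.foldl_cons, if_true]
      rw [pv_fold_nonempty rest (a :: p') (by simp)]
      have hb : (a == '.') = false := by simpa using ha
      simp [List.dropWhile, hb]

-- ---- the join of parts[:-1] is the prefix before the last dot (with the leading dot glued on) ----
theorem pv_flatten_dropLast (cs : List Char) (h : '.' ∈ cs) :
    (((pvSplitDots cs).dropLast).map ('.' :: ·)).flatten
      = '.' :: cs.take (pvLastDot cs).toNat := by
  induction cs with
  | nil => simp at h
  | cons c cs ih =>
    by_cases hc : c = '.'
    · subst hc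
      by_cases hd : '.' ∈ cs
      · obtain ⟨hd', tl, hS, ht⟩ := pv_splitDots_dot cs hd
        have hk : pvLastDot cs ≠ -1 := fun he => ((pv_lastDot_neg_iff cs).1 he) hd
        have hk0 : 0 ≤ pvLastDot cs := by have := pv_lastDot_ge_neg_one cs; omega
        have hIH := ih hd
        rw [hS] at hIH
        have hDL : (([] : List Char) :: hd' :: tl).dropLast = [] :: (hd' :: tl).dropLast := by
          simp
        rw [show pvSplitDots ('.' :: cs) = [] :: hd' :: tl by simp [pvSplitDots, hS], hDL]
        simp only [List.map_cons, List.flatten_cons] at hIH ⊢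
        rw [hIH]
        have hL : pvLastDot ('.' :: cs) = pvLastDot cs + 1 := by
          simp [pvLastDot, hk]
        rw [hL]
        have : (pvLastDot cs + 1).toNat = (pvLastDot cs).toNat + 1 := by omega
        simp [this]
      · have hS := pv_splitDots_no_dot cs hd
        have hL : pvLastDot ('.' :: cs) = 0 := by
          simp [pvLastDot, (pv_lastDot_neg_iff cs).2 hd]
        rw [show pvSplitDots ('.' :: cs) = [] :: [cs] by simp [pvSplitDots, hS], hL]
        simp
    · have hcs : '.' ∈ cs := by
        rcases List.mem_cons.1 h with h1 | h1
        · exact absurd h1.symm hc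
        · exact h1
      obtain ⟨hd', tl, hS, ht⟩ := pv_splitDots_dot cs hcs
      have hk : pvLastDot cs ≠ -1 := fun he => ((pv_lastDot_neg_iff cs).1 he) hcs
      have hk0 : 0 ≤ pvLastDot cs := by have := pv_lastDot_ge_neg_one cs; omega
      have hIH := ih hcs
      rw [hS] at hIH
      cases tl with
      | nil => exact absurd rfl ht
      | cons t ts =>
        rw [show pvSplitDots (c :: cs) = (c :: hd') :: t :: ts by simp [pvSplitDots, hc, hS]]
        rw [List.dropLast_cons_of_ne_nil (List.cons_ne_nil t ts)] at hIH ⊢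
        simp only [List.map_cons, List.flatten_cons] at hIH ⊢
        have hL : pvLastDot (c :: cs) = pvLastDot cs + 1 := by
          simp [pvLastDot, hk]
        rw [hL]
        have hTN : (pvLastDot cs + 1).toNat = (pvLastDot cs).toNat + 1 := by omega
        rw [hTN]
        simp only [List.take_succ_cons]
        -- hIH : ('.' :: hd') ++ flatten … = '.' :: take k cs
        have hIH' : hd' ++ (((t :: ts).dropLast).map ('.' :: ·)).flatten
            = cs.take (pvLastDot cs).toNat := by
          have := hIH
          simpa using this
        calc ('.' :: c :: hd') ++ (((t :: ts).dropLast).map ('.' :: ·)).flatten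
            = '.' :: c :: (hd' ++ (((t :: ts).dropLast).map ('.' :: ·)).flatten) := by simp
          _ = '.' :: c :: cs.take (pvLastDot cs).toNat := by rw [hIH']

-- ---- main characterisation of A's fold ----
theorem pv_main (cs : List Char) :
    ((pvSplitDots cs).dropLast).foldl
        (fun nn part => if nn = ([] : List Char) then part else nn ++ '.' :: part) []
      = (cs.take (pvLastDot cs).toNat).dropWhile (· == '.') := by
  by_cases h : '.' ∈ cs
  · rw [pv_fold_join _ (fun p hp => pv_splitDots_no_dot_parts cs p (List.dropLast_subset _ hp))]
    rw [pv_flatten_dropLast cs h]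
    simp [List.dropWhile]
  · rw [pv_splitDots_no_dot cs h]
    have : pvLastDot cs = -1 := (pv_lastDot_neg_iff cs).2 h
    simp [this]

-- A as a closed form
theorem pv_A_eq (dep_name replace_with : String) :
    replace_last_part_in_name dep_name replace_with
      = String.ofList ((dep_name.toList.take (pvLastDot dep_name.toList).toNat).dropWhile (· == '.')
          ++ replace_with.toList) := by
  show String.ofList
      (((PySem.List.slice (PySem.Chars.splitOn dep_name.toList ['.']) none (some (-1))).foldl
          (fun nn part => if nn = ([] : List Char) then part else nn ++ '.' :: part) [])
        ++ replace_with.toList) = _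
  rw [pv_splitOn_eq, PySem.List.slice_to_neg_one, pv_main]

-- B in the dot branch
theorem pv_B_eq (dep_name replace_with : String) (h : pvLastDot dep_name.toList ≠ -1) :
    replace_last_part_in_name_alt dep_name replace_with
      = String.ofList (dep_name.toList.take (pvLastDot dep_name.toList).toNat
          ++ replace_with.toList) := by
  unfold replace_last_part_in_name_alt
  rw [pv_rfind_eq, if_neg h, PySem.Chars.slice_eq_listSlice,
    PySem.List.slice_to dep_name.toList (by have := pv_lastDot_ge_neg_one dep_name.toList; omega)]

-- ===== VERDICT (by name: the statement is the Claim_ definition above) =====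
theorem replace_last_part_in_name_spec : Claim_unchanged_replace_last_part_in_name := by
  intro dep_name replace_with _ hnd
  rw [pv_A_eq]
  by_cases h : pvLastDot dep_name.toList = -1
  · unfold replace_last_part_in_name_alt
    rw [pv_rfind_eq, if_pos h]
    simp [h]
  · rw [pv_B_eq dep_name replace_with h]
    have hmem : '.' ∈ dep_name.toList := by
      by_contra hm; exact h ((pv_lastDot_neg_iff _).2 hm)
    cases hcs : dep_name.toList with
    | nil => simp [hcs] at hmem
    | cons c cs' =>
      rw [hcs] at h
      by_cases hc : c = '.'
      · -- head is '.', ¬D forces a single dot, so the last dot is at index 0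
        have hcount : dep_name.toList.count '.' < 2 := by
          by_contra hcnt
          exact hnd ⟨by simp [hcs, hc], by omega⟩
        have hcs' : '.' ∉ cs' := by
          intro hm
          have h1 : 0 < cs'.count '.' := List.count_pos_iff.2 hm
          have h2 : dep_name.toList.count '.' = cs'.count '.' + 1 := by
            simp [hcs, hc]
          omega
        have hz : pvLastDot (c :: cs') = 0 := by
          rw [hc, pvLastDot, if_pos ((pv_lastDot_neg_iff cs').2 hcs')]
          simp
        simp [hz]
      · -- head is not '.': the taken prefix starts with a non-dot (or is empty)
        have hb : (c == '.') = false := by simpa using hc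
        cases hk : (pvLastDot (c :: cs')).toNat with
        | zero => simp
        | succ k => simp [hb]

theorem replace_last_part_in_name_changed : Claim_changed_replace_last_part_in_name := by
  unfold Claim_changed_replace_last_part_in_name; decide

theorem replace_last_part_in_name_tight : Claim_exact_replace_last_part_in_name := by
  intro dep_name replace_with _ hD
  obtain ⟨hhead, hcount⟩ := hD
  cases hcs : dep_name.toList with
  | nil => simp [hcs] at hhead
  | cons c cs' =>
    rw [hcs] at hhead
    have hc : c = '.' := by simpa using hhead
    subst hc
    have hcs' : '.' ∈ cs' := by
      by_contra hm
      have h1 : cs'.count '.' = 0 := by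
        exact List.count_eq_zero.2 hm
      have h2 : dep_name.toList.count '.' = cs'.count '.' + 1 := by simp [hcs]
      omega
    have hk' : pvLastDot cs' ≠ -1 := fun he => ((pv_lastDot_neg_iff cs').1 he) hcs'
    have hk0 : 0 ≤ pvLastDot cs' := by have := pv_lastDot_ge_neg_one cs'; omega
    have hL : pvLastDot dep_name.toList = pvLastDot cs' + 1 := by
      rw [hcs, pvLastDot, if_neg hk']
    have hLne : pvLastDot dep_name.toList ≠ -1 := by omega
    rw [pv_A_eq, pv_B_eq dep_name replace_with hLne]
    intro heq
    have hlist : ((dep_name.toList.take (pvLastDot dep_name.toList).toNat).dropWhile (· == '.')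
          ++ replace_with.toList)
        = (dep_name.toList.take (pvLastDot dep_name.toList).toNat ++ replace_with.toList) := by
      have := congrArg String.toList heq
      simpa using this
    have hlen := congrArg List.length hlist
    simp only [List.length_append] at hlen
    have hTN : (pvLastDot dep_name.toList).toNat = (pvLastDot cs').toNat + 1 := by omega
    have htake : dep_name.toList.take (pvLastDot dep_name.toList).toNat
        = '.' :: cs'.take (pvLastDot cs').toNat := by
      rw [hTN, hcs, List.take_succ_cons]
    rw [htake] at hlen
    have hstep : ('.' :: cs'.take (pvLastDot cs').toNat).dropWhile (· == '.')
        = (cs'.take (pvLastDot cs').toNat).dropWhile (· == '.') := by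
      simp [List.dropWhile]
    rw [hstep] at hlen
    have hdw : ((cs'.take (pvLastDot cs').toNat).dropWhile (· == '.')).length
        ≤ (cs'.take (pvLastDot cs').toNat).length := List.length_dropWhile_le _ _
    simp only [List.length_cons] at hlen
    omega
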